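-- pv_equiv track=rewrite | github.com/rafalcode/aoc21 | d04/b.py | sumem
-- ===== SOURCE A (Python) =====
-- def sumem(l, nc, nr):
--     ra=[]
--     ca=[]
--     for i in range(nr):
--         if sum(l[i]) == 5:
--             ra.append(i)
--     for j in range(nc):
--         su=0
--         for i in range(nr):
--             su+=l[i][j]
--         if su == 5:
--             ca.append(j)
--     return ra, ca
-- ===== SOURCE B (Python) =====
-- def sumem(l, nc, nr):
--     ra = []
--     colsums = [0] * nc
--     for i in range(nr):
--         row = l[i]
--         if sum(row) == 5:
--             ra.append(i)
--         colsums = [c + x for c, x in zip(colsums, row)]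
--     ca = [j for j, s in enumerate(colsums) if s == 5]
--     return ra, ca
-- ===== Notes on version B (the rewrite author's own statement) =====
-- stated objective: simpler
-- what changed: Single row-major sweep that filters rows and accumulates a column-sum vector (elementwise zip-add), then filters the sums by enumeration, replacing A's separate column-major rescanning loop nest.
import Mathlib
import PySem

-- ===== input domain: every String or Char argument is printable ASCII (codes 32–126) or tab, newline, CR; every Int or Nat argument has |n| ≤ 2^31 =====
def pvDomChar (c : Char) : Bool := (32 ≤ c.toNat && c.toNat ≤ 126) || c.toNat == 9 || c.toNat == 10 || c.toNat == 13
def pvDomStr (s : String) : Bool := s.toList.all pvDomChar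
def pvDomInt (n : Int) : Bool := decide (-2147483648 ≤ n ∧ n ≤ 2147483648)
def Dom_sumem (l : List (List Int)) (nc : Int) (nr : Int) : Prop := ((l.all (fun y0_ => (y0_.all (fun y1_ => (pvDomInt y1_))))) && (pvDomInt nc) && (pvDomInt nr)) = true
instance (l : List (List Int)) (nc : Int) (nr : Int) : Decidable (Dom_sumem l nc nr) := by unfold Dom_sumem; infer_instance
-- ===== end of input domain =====

-- B does the same exact computation in one row-major sweep with a column-sum vector; objective: simpler.

-- ===== PORT A =====
def sumem (l : List (List Int)) (nc : Int) (nr : Int) : List Int × List Int :=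
  let ra := (PySem.List.pyRange 0 nr 1).foldl
    (fun ra i => if (PySem.List.pyGetD l i []).sum = 5 then ra ++ [i] else ra) []
  let ca := (PySem.List.pyRange 0 nc 1).foldl
    (fun ca j =>
      let su := (PySem.List.pyRange 0 nr 1).foldl
        (fun su i => su + PySem.List.pyGetD (PySem.List.pyGetD l i []) j 0) 0
      if su = 5 then ca ++ [j] else ca) []
  (ra, ca)

-- ===== PORT B =====
def sumem_alt (l : List (List Int)) (nc : Int) (nr : Int) : List Int × List Int :=
  let s := (PySem.List.pyRange 0 nr 1).foldl
    (fun (s : List Int × List Int) i =>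
      let row := PySem.List.pyGetD l i []
      ((if row.sum = 5 then s.1 ++ [i] else s.1),
       (s.2.zip row).map (fun p => p.1 + p.2)))
    ([], List.replicate nc.toNat (0 : Int))
  let ca := ((PySem.List.enumerate s.2 0).filter (fun p => p.2 = 5)).map (·.1)
  (s.1, ca)

-- ===== PRECONDITION & SPEC =====
-- Pre excludes exactly the inputs on which A raises IndexError (nr beyond len(l),
-- or an accessed row shorter than nc); A returns on every other input.
def Pre_sumem (l : List (List Int)) (nc : Int) (nr : Int) : Prop :=
  nr ≤ (l.length : Int) ∧ ∀ r ∈ l.take nr.toNat, nc ≤ (r.length : Int)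
instance (l : List (List Int)) (nc : Int) (nr : Int) : Decidable (Pre_sumem l nc nr) := by unfold Pre_sumem; infer_instance

def pvWitness_sumem : List (List Int) × Int × Int := ([[1, 4], [2, 3], [0, 0]], 2, 2)

def Spec_sumem (l : List (List Int)) (nc : Int) (nr : Int) (out : List Int × List Int) : Prop := out = sumem_alt l nc nr
instance (l : List (List Int)) (nc : Int) (nr : Int) (out : List Int × List Int) : Decidable (Spec_sumem l nc nr out) := by unfold Spec_sumem; infer_instance

-- ===== CLAIM (what is proved, stated in full; the proofs are below) =====
def Claim_equal_sumem : Prop := ∀ (l : List (List Int)) (nc : Int) (nr : Int), Dom_sumem l nc nr → Pre_sumem l nc nr → Spec_sumem l nc nr (sumem l nc nr)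

-- ===== LEMMAS AND PROOFS =====

-- a fold over range(nr) that reads only l[i] is a fold over the first nr rows
lemma foldl_pyRange_take {α β : Type} (l : List α) (d : α) (f : β → α → β)
    (nr : Int) (init : β) (h : nr ≤ (l.length : Int)) :
    (PySem.List.pyRange 0 nr 1).foldl (fun acc i => f acc (PySem.List.pyGetD l i d)) init
      = (l.take nr.toNat).foldl f init := by
  by_cases hn : nr ≤ 0
  · rw [PySem.List.pyRange_one_eq_nil (by omega)]
    have : nr.toNat = 0 := by omega
    simp [this]
  · have hlen : ((l.take nr.toNat).length : Int) = nr := by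
      simp; omega
    have h1 : PySem.List.pyRange 0 nr 1
        = PySem.List.pyRange 0 ((l.take nr.toNat).length : Int) 1 := by rw [hlen]
    rw [h1, ← PySem.List.foldl_pyRange_zero_pyGetD' (l.take nr.toNat) d f init]
    apply PySem.List.foldl_congr_mem
    intro acc i hi
    rw [PySem.List.mem_pyRange_one] at hi
    rw [hlen] at hi
    have h2 : PySem.List.pyGetD l i d = PySem.List.pyGetD (l.take nr.toNat) i d := by
      rw [PySem.List.pyGetD_eq_getElem l d hi.1 (by omega),
          PySem.List.pyGetD_eq_getElem (l.take nr.toNat) d hi.1 (by simp; omega)]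
      simp [List.getElem_take]
    rw [h2]

-- the column-sum invariant of B's sweep
lemma colsums_inv (rows : List (List Int)) (cs : List Int)
    (h : ∀ r ∈ rows, cs.length ≤ r.length) :
    (rows.foldl (fun cs row => (cs.zip row).map (fun p : Int × Int => p.1 + p.2)) cs).length
        = cs.length
    ∧ ∀ j : Nat, (hj : j < cs.length) →
      (rows.foldl (fun cs row => (cs.zip row).map (fun p : Int × Int => p.1 + p.2)) cs).getD j 0
        = cs[j] + (rows.map (fun r => r.getD j 0)).sum := by
  induction rows generalizing cs with
  | nil =>
    refine ⟨rfl, ?_⟩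
    intro j hj
    simp [List.getD, List.getElem?_eq_getElem hj]
  | cons row rest ih =>
    have hrow : cs.length ≤ row.length := h row (by simp)
    have hlen1 : ((cs.zip row).map (fun p : Int × Int => p.1 + p.2)).length = cs.length := by
      simp; omega
    have hrest : ∀ r ∈ rest, ((cs.zip row).map (fun p : Int × Int => p.1 + p.2)).length ≤ r.length := by
      intro r hr; rw [hlen1]; exact h r (by simp [hr])
    obtain ⟨ihl, ihg⟩ := ih _ hrest
    constructor
    · simpa [hlen1] using ihl
    · intro j hj
      have hj1 : j < ((cs.zip row).map (fun p : Int × Int => p.1 + p.2)).length := by omega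
      have := ihg j hj1
      simp only [List.foldl_cons]
      rw [this]
      have : ((cs.zip row).map (fun p : Int × Int => p.1 + p.2))[j]'hj1
          = cs[j] + row.getD j 0 := by
        simp [List.getElem_zip, List.getD, List.getElem?_eq_getElem (by omega : j < row.length)]
      rw [this]
      simp [add_assoc]

-- ===== VERDICT (by name: the statement is the Claim_ definition above) =====
theorem sumem_spec : Claim_equal_sumem := by
  intro l nc nr _ hpre
  obtain ⟨hnr, hrows⟩ := hpre
  unfold Spec_sumem sumem sumem_alt
  simp only []
  have hsplit : (PySem.List.pyRange 0 nr 1).foldl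
      (fun (s : List Int × List Int) i =>
        ((if (PySem.List.pyGetD l i []).sum = 5 then s.1 ++ [i] else s.1),
         (s.2.zip (PySem.List.pyGetD l i [])).map (fun p : Int × Int => p.1 + p.2)))
      ([], List.replicate nc.toNat (0 : Int))
      = ((PySem.List.pyRange 0 nr 1).foldl
           (fun ra i => if (PySem.List.pyGetD l i []).sum = 5 then ra ++ [i] else ra) [],
         (PySem.List.pyRange 0 nr 1).foldl
           (fun cs i => (cs.zip (PySem.List.pyGetD l i [])).map (fun p : Int × Int => p.1 + p.2))
           (List.replicate nc.toNat 0)) :=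
    PySem.List.foldl_prod_mk
      (fun ra i => if (PySem.List.pyGetD l i []).sum = 5 then ra ++ [i] else ra)
      (fun (cs : List Int) i => (cs.zip (PySem.List.pyGetD l i [])).map (fun p : Int × Int => p.1 + p.2))
      _ _ _
  rw [hsplit]
  refine Prod.ext rfl ?_
  -- column sides
  set rows := l.take nr.toNat with hrowsdef
  have hB : (PySem.List.pyRange 0 nr 1).foldl
      (fun cs i => ((cs.zip (PySem.List.pyGetD l i [])).map (fun p : Int × Int => p.1 + p.2)))
      (List.replicate nc.toNat (0 : Int))
      = rows.foldl (fun cs row => (cs.zip row).map (fun p : Int × Int => p.1 + p.2))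
          (List.replicate nc.toNat (0 : Int)) :=
    foldl_pyRange_take l []
      (fun (cs : List Int) row => (cs.zip row).map (fun p : Int × Int => p.1 + p.2)) nr _ hnr
  rw [hB]
  set cs0 := List.replicate nc.toNat (0 : Int) with hcs0
  have hc0 : cs0.length = nc.toNat := by simp [hcs0]
  have hle : ∀ r ∈ rows, cs0.length ≤ r.length := by
    intro r hr
    have := hrows r hr
    omega
  obtain ⟨hlen, hget⟩ := colsums_inv rows cs0 hle
  set cs := rows.foldl (fun cs row => (cs.zip row).map (fun p : Int × Int => p.1 + p.2)) cs0 with hcs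
  -- A's ca as a filter
  have hAfilter := PySem.List.foldl_append_ite_eq_filter
    (fun j : Int => (PySem.List.pyRange 0 nr 1).foldl
        (fun su i => su + PySem.List.pyGetD (PySem.List.pyGetD l i []) j 0) 0 = 5)
    (PySem.List.pyRange 0 nc 1) []
  rw [hAfilter]
  -- B's ca as a filter
  have hlen' : (cs.length : Int) = (nc.toNat : Int) := by rw [hlen, hc0]
  rw [PySem.List.enumerate_eq_map_pyRange cs 0, PySem.List.len_eq, hlen',
      List.filter_map, List.map_map]
  have hrange : PySem.List.pyRange 0 ((nc.toNat : Int)) 1 = PySem.List.pyRange 0 nc 1 := by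
    by_cases h : nc ≤ 0
    · rw [PySem.List.pyRange_one_eq_nil (by omega), PySem.List.pyRange_one_eq_nil (by omega)]
    · congr 1; omega
  rw [hrange]
  have hmapid : ∀ xs : List Int,
      xs.map ((fun p : Int × Int => p.1) ∘ (fun j => (j, PySem.List.pyGetD cs j 0))) = xs := by
    intro xs; simp [Function.comp_def]
  rw [hmapid]
  simp only [List.nil_append]
  apply List.filter_congr
  intro j hj
  rw [PySem.List.mem_pyRange_one] at hj
  -- inner su fold of A = column sum of B at j
  have hsu : (PySem.List.pyRange 0 nr 1).foldl
      (fun su i => su + PySem.List.pyGetD (PySem.List.pyGetD l i []) j 0) 0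
      = rows.foldl (fun su row => su + PySem.List.pyGetD row j 0) 0 :=
    foldl_pyRange_take l [] (fun (su : Int) row => su + PySem.List.pyGetD row j 0) nr 0 hnr
  have hjn : j.toNat < cs0.length := by omega
  have hgd : PySem.List.pyGetD cs j 0 = cs.getD j.toNat 0 := by
    rw [PySem.List.pyGetD_eq_getElem cs 0 hj.1 (by omega)]
    simp [List.getD, List.getElem?_eq_getElem (by omega : j.toNat < cs.length)]
  have hcol : ∀ r ∈ rows, PySem.List.pyGetD r j 0 = r.getD j.toNat 0 := by
    intro r hr
    have hl := hrows r hr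
    rw [PySem.List.pyGetD_eq_getElem r 0 hj.1 (by omega)]
    simp [List.getD, List.getElem?_eq_getElem (by omega : j.toNat < r.length)]
  have hcong : rows.foldl (fun su row => su + PySem.List.pyGetD row j 0) 0
      = rows.foldl (fun su row => su + row.getD j.toNat 0) 0 :=
    PySem.List.foldl_congr_mem' rows _ _ 0 (by intro r hr acc; rw [hcol r hr])
  rw [hsu, hcong, PySem.List.foldl_add rows (fun row => row.getD j.toNat 0) 0]
  simp only [Function.comp_apply]
  rw [hgd, hget j.toNat hjn]
  simp [hcs0, List.getElem_replicate]

-- ===== VERDICT (by name: the statement is the Claim_ definition above) =====
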